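-- pv_equiv track=rewrite | github.com/juanchicruzz/AlgoritmosGeneticos | TPs/TP Final/Pruebas PY/Functions.py | FindNextAerogenerator
-- ===== SOURCE A (Python) =====
-- def FindNextAerogenerator(f,index):
--     cantidadCelda = 0
--     for i in range(index+1,len(f)):
--         if f[i] == 0:
--             cantidadCelda = cantidadCelda + 1
--         else:
--             cantidadCelda = cantidadCelda + 1
--             break
--     return cantidadCelda
-- ===== SOURCE B (Python) =====
-- def FindNextAerogenerator(f, index):
--     positions = [i for i in range(index + 1, len(f)) if f[i] != 0]
--     if positions:
--         return positions[0] - index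
--     return max(0, len(f) - index - 1)
-- ===== Notes on version B (the rewrite author's own statement) =====
-- stated objective: alternative
-- what changed: Replaces the early-breaking counting loop by a collect-then-select pass: gather all positions of nonzero cells after index, return first-position - index, or the scanned-tail length max(0, len(f)-index-1) if none.
import Mathlib
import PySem

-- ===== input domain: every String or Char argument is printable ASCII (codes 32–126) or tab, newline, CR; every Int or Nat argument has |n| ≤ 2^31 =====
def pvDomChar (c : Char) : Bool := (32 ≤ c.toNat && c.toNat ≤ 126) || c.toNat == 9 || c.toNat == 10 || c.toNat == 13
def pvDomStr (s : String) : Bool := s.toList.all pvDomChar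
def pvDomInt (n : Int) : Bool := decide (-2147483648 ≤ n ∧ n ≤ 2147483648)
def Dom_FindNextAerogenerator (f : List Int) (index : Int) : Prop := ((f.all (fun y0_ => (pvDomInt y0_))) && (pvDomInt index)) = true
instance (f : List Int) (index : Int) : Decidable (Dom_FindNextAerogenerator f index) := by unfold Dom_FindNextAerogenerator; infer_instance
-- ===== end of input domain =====

-- ===== PORT A =====
-- shared primitive accessor: Python f[i] (pyGet? is none on IndexError; Pre_ keeps accesses in range)
def pvGetF (f : List Int) (i : Int) : Int := (PySem.List.pyGet? f i).getD 0

-- A's for-loop with break, as structural recursion over the range list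
def FNA_loop (f : List Int) : List Int → Int → Int
  | [], acc => acc
  | i :: rest, acc =>
    if pvGetF f i = 0 then FNA_loop f rest (acc + 1)
    else acc + 1

def FindNextAerogenerator (f : List Int) (index : Int) : Int :=
  FNA_loop f (PySem.List.pyRange (index + 1) (f.length : Int) 1) 0

-- ===== PORT B =====
-- B: collect all positions of nonzero cells after index, then select the first
def FindNextAerogenerator_alt (f : List Int) (index : Int) : Int :=
  match (PySem.List.pyRange (index + 1) (f.length : Int) 1).filter
      (fun i => pvGetF f i ≠ 0) with
  | p :: _ => p - index
  | [] => max 0 ((f.length : Int) - index - 1)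

-- ===== PRECONDITION & SPEC =====
-- Pre_ excludes exactly the inputs on which Python A (and B alike) raise IndexError: index < -len(f) - 1.
def Pre_FindNextAerogenerator (f : List Int) (index : Int) : Prop :=
  -(f.length : Int) - 1 ≤ index
instance (f : List Int) (index : Int) : Decidable (Pre_FindNextAerogenerator f index) := by
  unfold Pre_FindNextAerogenerator; infer_instance
def pvWitness_FindNextAerogenerator : List Int × Int := ([0, 0, 5, 0], 0)

def Spec_FindNextAerogenerator (f : List Int) (index : Int) (out : Int) : Prop := out = FindNextAerogenerator_alt f index
instance (f : List Int) (index : Int) (out : Int) : Decidable (Spec_FindNextAerogenerator f index out) := by unfold Spec_FindNextAerogenerator; infer_instance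

-- ===== CLAIM (what is proved, stated in full; the proofs are below) =====
def Claim_equal_FindNextAerogenerator : Prop := ∀ (f : List Int) (index : Int), Dom_FindNextAerogenerator f index → Pre_FindNextAerogenerator f index → Spec_FindNextAerogenerator f index (FindNextAerogenerator f index)

-- ===== LEMMAS AND PROOFS =====

-- core invariant: the early-breaking loop over pyRange a b 1 equals collect-then-select
theorem FNA_loop_range (f : List Int) : ∀ (n : Nat) (a acc b : Int), b - a ≤ (n : Int) →
    FNA_loop f (PySem.List.pyRange a b 1) acc =
      (match (PySem.List.pyRange a b 1).filter (fun i => pvGetF f i ≠ 0) with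
       | p :: _ => acc + (p - a + 1)
       | [] => acc + max 0 (b - a)) := by
  intro n
  induction n with
  | zero =>
    intro a acc b hb
    rw [PySem.List.pyRange_one_eq_nil (by omega)]
    show acc = acc + max 0 (b - a)
    rw [max_eq_left (by omega : b - a ≤ 0)]
    omega
  | succ k ih =>
    intro a acc b hb
    by_cases hab : a < b
    · rw [PySem.List.pyRange_one_cons hab]
      simp only [FNA_loop, List.filter_cons]
      by_cases h0 : pvGetF f a = 0
      · rw [if_pos h0, if_neg (by simp [h0])]
        rw [ih (a + 1) (acc + 1) b (by omega)]
        cases hf : (PySem.List.pyRange (a + 1) b 1).filter (fun i => pvGetF f i ≠ 0) with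
        | nil =>
          show acc + 1 + max 0 (b - (a + 1)) = acc + max 0 (b - a)
          rw [max_eq_right (by omega : (0 : Int) ≤ b - (a + 1)),
            max_eq_right (by omega : (0 : Int) ≤ b - a)]
          omega
        | cons p ps =>
          show acc + 1 + (p - (a + 1) + 1) = acc + (p - a + 1)
          omega
      · rw [if_neg h0, if_pos (by simp [h0])]
        show acc + 1 = acc + (a - a + 1)
        omega
    · rw [PySem.List.pyRange_one_eq_nil (by omega)]
      show acc = acc + max 0 (b - a)
      rw [max_eq_left (by omega : b - a ≤ 0)]
      omega

-- ===== VERDICT (by name: the statement is the Claim_ definition above) =====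
theorem FindNextAerogenerator_spec : Claim_equal_FindNextAerogenerator := by
  intro f index _ _
  unfold Spec_FindNextAerogenerator FindNextAerogenerator FindNextAerogenerator_alt
  rw [FNA_loop_range f ((f.length : Int) - (index + 1)).toNat (index + 1) 0 (f.length : Int)
    (by omega)]
  cases hf : (PySem.List.pyRange (index + 1) (f.length : Int) 1).filter
      (fun i => pvGetF f i ≠ 0) with
  | nil =>
    show 0 + max 0 ((f.length : Int) - (index + 1)) = max 0 ((f.length : Int) - index - 1)
    have h1 : (f.length : Int) - (index + 1) = (f.length : Int) - index - 1 := by ring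
    rw [h1, zero_add]
  | cons p ps =>
    show 0 + (p - (index + 1) + 1) = p - index
    omega
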